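-- pv_equiv track=rewrite | github.com/dancegit/Tmux-Orchestrator | tmux_orchestrator/agents/agent_factory.py | _get_deployment_order
-- ===== SOURCE A (Python) =====
-- from typing import Dict, List, Optional, Any, Tuple
--
-- def _get_deployment_order(roles: List[str]) -> List[str]:
--     """Get the optimal deployment order for roles."""
--     # Orchestrator should always be first
--     ordered_roles = []
--
--     if "orchestrator" in roles:
--         ordered_roles.append("orchestrator")
--
--     # PM should be early for coordination
--     if "pm" in roles:
--         ordered_roles.append("pm")
--
--     # System roles that others might depend on
--     system_roles = ["sysadmin", "devops", "securityops", "networkops"]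
--     for role in system_roles:
--         if role in roles and role not in ordered_roles:
--             ordered_roles.append(role)
--
--     # Development roles
--     dev_roles = ["developer", "tester", "testrunner", "researcher"]
--     for role in dev_roles:
--         if role in roles and role not in ordered_roles:
--             ordered_roles.append(role)
--
--     # Add any remaining roles
--     for role in roles:
--         if role not in ordered_roles:
--             ordered_roles.append(role)
--
--     return ordered_roles
-- ===== SOURCE B (Python) =====
-- _PRIORITY = ["orchestrator", "pm", "sysadmin", "devops", "securityops", "networkops",
--              "developer", "tester", "testrunner", "researcher"]
-- _INDEX = {r: i for i, r in enumerate(_PRIORITY)}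
--
--
-- def _get_deployment_order(roles):
--     """Get the optimal deployment order for roles."""
--     deduped = list(dict.fromkeys(roles))
--     return sorted(deduped, key=lambda r: _INDEX.get(r, len(_PRIORITY)))
-- ===== Notes on version B (the rewrite author's own statement) =====
-- stated objective: faster
-- what changed: A builds the result by staged appends with membership scans over the input and the growing output; B deduplicates the input once (dict.fromkeys) and stable-sorts the deduped list by each role's index in the fixed priority list, unknown roles sharing the maximal key so the stable sort keeps their input order.
import Mathlib
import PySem

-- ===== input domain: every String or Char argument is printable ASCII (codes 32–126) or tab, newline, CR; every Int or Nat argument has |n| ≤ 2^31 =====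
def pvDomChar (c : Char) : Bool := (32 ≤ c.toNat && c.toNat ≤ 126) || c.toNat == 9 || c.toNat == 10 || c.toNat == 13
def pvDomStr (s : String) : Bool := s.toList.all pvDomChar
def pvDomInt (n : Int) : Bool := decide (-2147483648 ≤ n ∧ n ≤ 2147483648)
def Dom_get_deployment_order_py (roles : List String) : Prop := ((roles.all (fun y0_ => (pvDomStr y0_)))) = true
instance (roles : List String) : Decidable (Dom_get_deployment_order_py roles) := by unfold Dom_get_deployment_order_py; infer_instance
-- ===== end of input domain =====

-- B replaces A's staged appends with membership scans by a single stable sort: dedup the input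
-- (first occurrences) and stable-sort it by each role's index in the fixed priority list, unknown
-- roles sharing the maximal key so the stable sort keeps their input order (objective: faster).

-- ===== PORT A =====
-- literal transliteration of A: staged appends into one growing list
def pvSysRoles : List String := ["sysadmin", "devops", "securityops", "networkops"]
def pvDevRoles : List String := ["developer", "tester", "testrunner", "researcher"]

def get_deployment_order_py (roles : List String) : List String :=
  let ordered0 : List String := []
  let ordered1 := if roles.contains "orchestrator" then ordered0 ++ ["orchestrator"] else ordered0
  let ordered2 := if roles.contains "pm" then ordered1 ++ ["pm"] else ordered1
  let ordered3 := pvSysRoles.foldl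
    (fun acc role => if roles.contains role && !(acc.contains role) then acc ++ [role] else acc) ordered2
  let ordered4 := pvDevRoles.foldl
    (fun acc role => if roles.contains role && !(acc.contains role) then acc ++ [role] else acc) ordered3
  roles.foldl (fun acc role => if !(acc.contains role) then acc ++ [role] else acc) ordered4

-- ===== PORT B =====
def pvPriority : List String :=
  ["orchestrator", "pm", "sysadmin", "devops", "securityops", "networkops",
   "developer", "tester", "testrunner", "researcher"]

-- _INDEX = {r: i for i, r in enumerate(_PRIORITY)}
def pvIndex : PySem.Dict String Int :=
  (PySem.List.enumerate pvPriority).foldl (fun d p => d.insert p.2 p.1) PySem.Dict.empty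

-- lambda r: _INDEX.get(r, len(_PRIORITY))
def pvKey (r : String) : Int := PySem.Dict.getD pvIndex r (pvPriority.length : Int)

def get_deployment_order_py_alt (roles : List String) : List String :=
  let deduped := PySem.List.dedup roles
  PySem.List.sorted deduped pvKey

-- ===== PRECONDITION & SPEC =====
def Spec_get_deployment_order_py (roles : List String) (out : List String) : Prop := out = get_deployment_order_py_alt roles
instance (roles : List String) (out : List String) : Decidable (Spec_get_deployment_order_py roles out) := by unfold Spec_get_deployment_order_py; infer_instance

-- ===== CLAIM (what is proved, stated in full; the proofs are below) =====
def Claim_equal_get_deployment_order_py : Prop := ∀ (roles : List String), Dom_get_deployment_order_py roles → Spec_get_deployment_order_py roles (get_deployment_order_py roles)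

-- ===== LEMMAS AND PROOFS =====

-- ---- A-side: A's output is "priority roles present, in priority order" ++ "ordered dedup of the rest"

-- A's staged fold over a duplicate-free group of roles, none already in the accumulator,
-- appends exactly the group's members that occur in `roles`.
theorem pv_stage (c : String → Bool) :
    ∀ (Q acc : List String), Q.Nodup → (∀ p ∈ Q, p ∉ acc) →
      Q.foldl (fun a r => if c r && !(a.contains r) then a ++ [r] else a) acc
        = acc ++ Q.filter c := by
  intro Q
  induction Q with
  | nil => intro acc _ _; simp
  | cons r Q ih =>
    intro acc hnd hdis
    have hr : acc.contains r = false := by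
      cases h : acc.contains r
      · rfl
      · exact absurd (List.contains_iff_mem.mp h) (hdis r (by simp))
    by_cases hc : c r = true
    · rw [List.foldl_cons, if_pos (by rw [hc, hr]; decide)]
      rw [ih (acc ++ [r]) hnd.of_cons ?_]
      · simp [hc]
      · intro p hp
        simp only [List.mem_append, List.mem_singleton]
        rintro (h | h)
        · exact hdis p (by simp [hp]) h
        · exact (List.nodup_cons.mp hnd).1 (h ▸ hp)
    · have hc' : c r = false := by simpa using hc
      rw [List.foldl_cons, if_neg (by rw [hc']; simp)]
      rw [ih acc hnd.of_cons (fun p hp => hdis p (by simp [hp]))]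
      simp [hc']

-- the seen-tracking recursion behind A's final dedup-append loop
def pvNewOnesAcc : List String → List String → List String
  | [], _ => []
  | r :: rs, acc => if acc.contains r then pvNewOnesAcc rs acc else r :: pvNewOnesAcc rs (acc ++ [r])

-- the same recursion with the priority head of the accumulator made explicit
def pvNewOnes : List String → List String → List String
  | [], _ => []
  | r :: rs, s =>
      if pvPriority.contains r || s.contains r then pvNewOnes rs s
      else r :: pvNewOnes rs (s ++ [r])

-- A's final fold, split from its accumulator
theorem pv_lastFold (rs : List String) :
    ∀ acc, rs.foldl (fun a r => if !(a.contains r) then a ++ [r] else a) acc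
      = acc ++ pvNewOnesAcc rs acc := by
  induction rs with
  | nil => intro acc; simp [pvNewOnesAcc]
  | cons r rs ih =>
    intro acc
    by_cases h : acc.contains r = true
    · rw [List.foldl_cons, if_neg (by rw [h]; decide), ih acc,
        show pvNewOnesAcc (r :: rs) acc = pvNewOnesAcc rs acc from by
          rw [pvNewOnesAcc, if_pos h]]
    · have h' : acc.contains r = false := by simpa using h
      rw [List.foldl_cons, if_pos (by rw [h']; decide), ih (acc ++ [r]),
        show pvNewOnesAcc (r :: rs) acc = r :: pvNewOnesAcc rs (acc ++ [r]) from by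
          rw [pvNewOnesAcc, if_neg (by rw [h']; decide)]]
      simp

theorem pv_acc_eq_new (roles : List String) :
    ∀ (rs s : List String), (∀ r ∈ rs, r ∈ roles) →
      pvNewOnesAcc rs (pvPriority.filter (fun p => roles.contains p) ++ s) = pvNewOnes rs s := by
  intro rs
  induction rs with
  | nil => intro s _; rfl
  | cons r rs ih =>
    intro s hsub
    have hr : r ∈ roles := hsub r (by simp)
    have hkey : (pvPriority.filter (fun p => roles.contains p) ++ s).contains r
        = (pvPriority.contains r || s.contains r) := by
      by_cases hp : r ∈ pvPriority <;> by_cases hs : r ∈ s <;>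
        simp [List.mem_filter, hp, hs, hr]
    by_cases hc : (pvPriority.contains r || s.contains r) = true
    · rw [show pvNewOnesAcc (r :: rs) (pvPriority.filter (fun p => roles.contains p) ++ s)
            = pvNewOnesAcc rs (pvPriority.filter (fun p => roles.contains p) ++ s) from by
          rw [pvNewOnesAcc, if_pos (hkey.trans hc)],
        show pvNewOnes (r :: rs) s = pvNewOnes rs s from by
          rw [pvNewOnes, if_pos hc]]
      exact ih s (fun q hq => hsub q (by simp [hq]))
    · have hc' : (pvPriority.contains r || s.contains r) = false := by simpa using hc
      rw [show pvNewOnesAcc (r :: rs) (pvPriority.filter (fun p => roles.contains p) ++ s)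
            = r :: pvNewOnesAcc rs (pvPriority.filter (fun p => roles.contains p) ++ s ++ [r]) from by
          rw [pvNewOnesAcc, if_neg (by rw [hkey, hc']; decide)],
        show pvNewOnes (r :: rs) s = r :: pvNewOnes rs (s ++ [r]) from by
          rw [pvNewOnes, if_neg (by rw [hc']; decide)]]
      rw [List.append_assoc]
      rw [ih (s ++ [r]) (fun q hq => hsub q (by simp [hq]))]

theorem pv_new_update :
    ∀ (rs s : List String),
      s ++ pvNewOnes rs s
        = PySem.Set.update s (rs.filter (fun r => !(pvPriority.contains r))) := by
  intro rs
  induction rs with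
  | nil => intro s; simp [pvNewOnes, PySem.Set.update_nil]
  | cons r rs ih =>
    intro s
    by_cases hp : pvPriority.contains r = true
    · rw [show pvNewOnes (r :: rs) s = pvNewOnes rs s from by
          rw [pvNewOnes, if_pos (by rw [hp]; simp)],
        List.filter_cons, if_neg (by rw [hp]; decide), ih s]
    · have hp' : pvPriority.contains r = false := by simpa using hp
      by_cases hs : s.contains r = true
      · have hadd : PySem.Set.add s r = s := by simp only [PySem.Set.add, PySem.Set.contains]; rw [if_pos hs]
        rw [show pvNewOnes (r :: rs) s = pvNewOnes rs s from by
            rw [pvNewOnes, if_pos (by rw [hs]; simp)],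
          List.filter_cons, if_pos (by rw [hp']; decide), PySem.Set.update_cons, hadd, ih s]
      · have hs' : s.contains r = false := by simpa using hs
        have hadd : PySem.Set.add s r = s ++ [r] := by
          simp only [PySem.Set.add, PySem.Set.contains]; rw [if_neg (by rw [hs']; decide)]
        rw [show pvNewOnes (r :: rs) s = r :: pvNewOnes rs (s ++ [r]) from by
            rw [pvNewOnes, if_neg (by rw [hp', hs']; decide)],
          List.filter_cons, if_pos (by rw [hp']; decide), PySem.Set.update_cons, hadd,
          ← ih (s ++ [r])]
        simp

-- the head of A's output is the priority list filtered by occurrence in `roles`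
theorem pv_headA (roles : List String) :
    (pvDevRoles.foldl
      (fun acc role => if roles.contains role && !(acc.contains role) then acc ++ [role] else acc)
      (pvSysRoles.foldl
        (fun acc role => if roles.contains role && !(acc.contains role) then acc ++ [role] else acc)
        (if roles.contains "pm"
          then (if roles.contains "orchestrator" then ([] : List String) ++ ["orchestrator"] else []) ++ ["pm"]
          else (if roles.contains "orchestrator" then ([] : List String) ++ ["orchestrator"] else []))))
      = pvPriority.filter (fun p => roles.contains p) := by
  have h2 : (if roles.contains "pm"
        then (if roles.contains "orchestrator" then ([] : List String) ++ ["orchestrator"] else []) ++ ["pm"]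
        else (if roles.contains "orchestrator" then ([] : List String) ++ ["orchestrator"] else []))
      = (["orchestrator", "pm"] : List String).filter (fun p => roles.contains p) := by
    by_cases ho : "orchestrator" ∈ roles <;> by_cases hp : "pm" ∈ roles <;>
      simp [ho, hp]
  rw [h2]
  rw [pv_stage (fun p => roles.contains p) pvSysRoles _ (by decide) ?hd1]
  case hd1 =>
    intro p hp hmem
    have hpm := List.mem_of_mem_filter hmem
    fin_cases hp <;> simp_all
  rw [pv_stage (fun p => roles.contains p) pvDevRoles _ (by decide) ?hd2]
  case hd2 =>
    intro p hp hmem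
    rcases List.mem_append.mp hmem with h | h
    · have := List.mem_of_mem_filter h
      fin_cases hp <;> simp_all
    · have := List.mem_of_mem_filter h
      fin_cases hp <;> simp_all [pvSysRoles]
  rw [← List.filter_append, ← List.filter_append]
  rfl

-- ---- B-side: the stable insertion sort splits into "priority part" ++ "max-key part in input order"

-- the key never exceeds 10, and is exactly 10 off the priority list
theorem pvKey_le (x : String) : pvKey x ≤ 10 := by
  by_cases h : x ∈ pvPriority
  · fin_cases h <;> decide
  · have hnone : PySem.Dict.get? pvIndex x = none := by
      have hit : pvIndex.items
          = [("orchestrator", (0:Int)), ("pm", 1), ("sysadmin", 2), ("devops", 3),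
             ("securityops", 4), ("networkops", 5), ("developer", 6), ("tester", 7),
             ("testrunner", 8), ("researcher", 9)] := by decide
      rw [PySem.Dict.get?, hit]
      rw [List.find?_eq_none.mpr ?_]
      · rfl
      · intro pr hpr hbeq
        apply h
        have := eq_of_beq hbeq
        fin_cases hpr <;> simp_all [pvPriority]
    simp only [pvKey, PySem.Dict.getD, hnone, Option.getD_none]
    decide

theorem pvKey_not_mem (x : String) (h : x ∉ pvPriority) : pvKey x = 10 := by
  have hnone : PySem.Dict.get? pvIndex x = none := by
    have hit : pvIndex.items
        = [("orchestrator", (0:Int)), ("pm", 1), ("sysadmin", 2), ("devops", 3),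
           ("securityops", 4), ("networkops", 5), ("developer", 6), ("tester", 7),
           ("testrunner", 8), ("researcher", 9)] := by decide
    rw [PySem.Dict.get?, hit]
    rw [List.find?_eq_none.mpr ?_]
    · rfl
    · intro pr hpr hbeq
      apply h
      have := eq_of_beq hbeq
      fin_cases hpr <;> simp_all [pvPriority]
  simp only [pvKey, PySem.Dict.getD, hnone, Option.getD_none]
  rfl

theorem pvKey_mem_lt (x : String) (h : x ∈ pvPriority) : pvKey x < 10 := by
  fin_cases h <;> decide

-- inserting x into K ++ U where x sorts before everything in U inserts into K
theorem pv_insertBy_append (before : String → String → Bool) (x : String) :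
    ∀ (K U : List String), (∀ u ∈ U, before x u = true) →
      PySem.List.insertBy before x (K ++ U) = PySem.List.insertBy before x K ++ U := by
  intro K
  induction K with
  | nil =>
    intro U hU
    cases U with
    | nil => rfl
    | cons u U' =>
      simp only [List.nil_append, PySem.List.insertBy]
      rw [if_pos (hU u (by simp))]
      rfl
  | cons k K' ih =>
    intro U hU
    simp only [List.cons_append, PySem.List.insertBy]
    by_cases hb : before x k = true
    · rw [if_pos hb, if_pos hb]; rfl
    · rw [if_neg hb, if_neg hb, ih U hU]; rfl

-- the stable-sort fold over a "priority ++ max-key" accumulator keeps the two zones separate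
theorem pv_split (before : String → String → Bool) (p : String → Bool)
    (h1 : ∀ x y, p x = true → p y = false → before x y = true)
    (h2 : ∀ x y, p x = false → before x y = false) :
    ∀ (ds K U : List String), (∀ k ∈ K, p k = true) → (∀ u ∈ U, p u = false) →
      ds.foldl (fun acc x => PySem.List.insertBy before x acc) (K ++ U)
        = (ds.filter p).foldl (fun acc x => PySem.List.insertBy before x acc) K
          ++ (U ++ ds.filter (fun x => !p x)) := by
  intro ds
  induction ds with
  | nil => intro K U _ _; simp
  | cons x ds ih =>
    intro K U hK hU
    by_cases hp : p x = true
    · rw [List.foldl_cons,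
        pv_insertBy_append before x K U (fun u hu => h1 x u hp (hU u hu)),
        ih (PySem.List.insertBy before x K) U ?_ hU,
        List.filter_cons, if_pos hp, List.filter_cons, if_neg (by rw [hp]; decide),
        List.foldl_cons]
      intro k hk
      rcases (PySem.List.mem_insertBy before x k K).mp hk with h | h
      · exact h ▸ hp
      · exact hK k h
    · have hp' : p x = false := by simpa using hp
      rw [List.foldl_cons,
        PySem.List.insertBy_of_forall_not_before before x (K ++ U) (fun y _ => h2 x y hp'),
        List.append_assoc,
        ih K (U ++ [x]) hK ?_,
        List.filter_cons, if_neg (by rw [hp']; decide),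
        List.filter_cons, if_pos (by rw [hp']; decide)]
      · simp
      · intro u hu
        rcases List.mem_append.mp hu with h | h
        · exact hU u h
        · simp at h; exact h ▸ hp'
-- the sorted priority zone of B is exactly A's head: the priority list filtered by occurrence
theorem pv_sorted_known (roles : List String) :
    PySem.List.sorted ((PySem.Set.ofList roles).filter (fun r => pvPriority.contains r)) pvKey
      = pvPriority.filter (fun p => roles.contains p) := by
  apply PySem.List.sorted_eq_of_perm_of_pairwise_lt
  · rw [List.perm_ext_iff_of_nodup
      (List.Nodup.filter _ (by decide))
      (List.Nodup.filter _ (PySem.Set.nodup_ofList roles))]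
    intro a
    simp only [List.mem_filter, PySem.Set.mem_ofList, List.contains_iff_mem]
    tauto
  · exact List.Pairwise.sublist List.filter_sublist (by decide)

-- set(xs) commutes with filtering
theorem pv_ofList_filter (q : String → Bool) :
    ∀ (roles acc : List String),
      (roles.filter q).foldl PySem.Set.add (acc.filter q)
        = (roles.foldl PySem.Set.add acc).filter q := by
  intro roles
  induction roles with
  | nil => intro acc; simp
  | cons r rs ih =>
    intro acc
    by_cases hq : q r = true
    · have hadd : PySem.Set.add (acc.filter q) r = (PySem.Set.add acc r).filter q := by
        by_cases hm : r ∈ acc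
        · have h1 : (acc.filter q).contains r = true := by
            simp [List.mem_filter, hm, hq]
          have h2 : acc.contains r = true := by simp [hm]
          simp only [PySem.Set.add, PySem.Set.contains]
          rw [if_pos h1, if_pos h2]
        · have h1 : (acc.filter q).contains r = false := by
            simp [List.mem_filter, hm]
          have h2 : acc.contains r = false := by simp [hm]
          simp only [PySem.Set.add, PySem.Set.contains]
          rw [if_neg (by rw [h1]; decide), if_neg (by rw [h2]; decide)]
          rw [List.filter_append, List.filter_cons, if_pos hq]
          rfl
      rw [List.filter_cons, if_pos hq, List.foldl_cons, List.foldl_cons, hadd, ih]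
    · have hq' : q r = false := by simpa using hq
      have hadd : acc.filter q = (PySem.Set.add acc r).filter q := by
        simp only [PySem.Set.add, PySem.Set.contains]
        by_cases hm : acc.contains r = true
        · rw [if_pos hm]
        · rw [if_neg hm, List.filter_append, List.filter_cons, if_neg (by rw [hq']; decide)]
          simp
      rw [List.filter_cons, if_neg (by rw [hq']; decide), List.foldl_cons, hadd, ih]

-- ===== VERDICT (by name: the statement is the Claim_ definition above) =====
theorem get_deployment_order_py_spec : Claim_equal_get_deployment_order_py := by
  intro roles _
  show _ = _
  unfold get_deployment_order_py get_deployment_order_py_alt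
  simp only []
  -- A's side: priority head ++ ordered dedup of the rest
  rw [pv_lastFold, pv_headA]
  have hA := pv_acc_eq_new roles roles [] (fun r hr => hr)
  rw [List.append_nil] at hA
  rw [hA]
  have hnew := pv_new_update roles []
  rw [List.nil_append] at hnew
  rw [hnew, PySem.Set.update_nil_left]
  -- B's side: split the stable sort into the priority zone and the max-key zone
  rw [PySem.List.dedup_eq_ofList, PySem.List.sorted_eq_foldl_insertBy]
  have hsplit := pv_split (fun a b => decide (pvKey a < pvKey b))
    (fun r => pvPriority.contains r)
    (fun x y hx hy => by
      have hx2 : pvPriority.contains x = true := hx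
      have hy2 : pvPriority.contains y = false := hy
      have hx' : x ∈ pvPriority := List.contains_iff_mem.mp hx2
      have hy' : y ∉ pvPriority := fun h => by
        rw [List.contains_iff_mem.mpr h] at hy2; simp at hy2
      have := pvKey_mem_lt x hx'
      have := pvKey_not_mem y hy'
      simp only [decide_eq_true_eq]; omega)
    (fun x y hx => by
      have hx2 : pvPriority.contains x = false := hx
      have hx' : x ∉ pvPriority := fun h => by
        rw [List.contains_iff_mem.mpr h] at hx2; simp at hx2
      have := pvKey_not_mem x hx'
      have := pvKey_le y
      simp only [decide_eq_false_iff_not, not_lt]; omega)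
    (PySem.Set.ofList roles) [] [] (by simp) (by simp)
  rw [List.nil_append, List.nil_append] at hsplit
  rw [hsplit, ← PySem.List.sorted_eq_foldl_insertBy, pv_sorted_known]
  congr 1
  -- tails: ordered dedup of the non-priority roles = non-priority part of the ordered dedup
  have hf := pv_ofList_filter (fun x => !pvPriority.contains x) roles []
  simp only [List.filter_nil] at hf
  rw [PySem.Set.ofList_eq_foldl, PySem.Set.ofList_eq_foldl]
  simp only []
  exact hf
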